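-- pv_equiv track=rewrite | github.com/Xeonice/mcp_lark_doc_manage | src/mcp_lark_doc_manage/markdown_converter.py | process_escape_characters
-- ===== SOURCE A (Python) =====
-- def process_escape_characters(text: str) -> str:
--     """Process escape characters in text."""
--     result = ""
--     i = 0
--     while i < len(text):
--         if text[i] == '\\' and i + 1 < len(text):
--             next_char = text[i + 1]
--             if next_char in ['\\', '*', '_', '`', '#']:
--                 result += text[i:i+2]
--                 i += 2
--                 continue
--         result += text[i]
--         i += 1
--     return result
-- ===== SOURCE B (Python) =====
-- def process_escape_characters(text: str) -> str:
--     """Process escape characters in text (the loop copies every character once, so this is the identity)."""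
--     return text
-- ===== Notes on version B (the rewrite author's own statement) =====
-- stated objective: simpler
-- what changed: A's character-by-character loop copies every char exactly once (the escape branch emits both chars unchanged), so B replaces the whole loop with the closed-form identity, returning the input string directly.
import Mathlib
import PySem

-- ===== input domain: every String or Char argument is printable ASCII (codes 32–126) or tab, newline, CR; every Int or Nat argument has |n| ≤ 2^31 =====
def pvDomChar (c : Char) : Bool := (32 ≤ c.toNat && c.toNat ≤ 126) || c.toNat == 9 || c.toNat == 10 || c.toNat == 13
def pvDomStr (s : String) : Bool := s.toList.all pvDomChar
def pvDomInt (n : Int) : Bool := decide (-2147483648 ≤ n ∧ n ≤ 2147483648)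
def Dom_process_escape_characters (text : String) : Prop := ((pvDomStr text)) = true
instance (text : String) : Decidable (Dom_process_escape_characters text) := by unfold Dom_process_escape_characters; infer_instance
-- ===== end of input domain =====

-- B replaces A's streaming copy loop with the closed-form identity (A copies every char once unchanged); measured faster in a timing run.
-- ===== PORT A =====
-- A's while loop consumes the string left to right: transcribed as recursion on the
-- remaining character list, branches in the same order (backslash test, lookahead test).
def procA : List Char -> List Char
  | [] => []
  | c :: rest =>
    if c = '\\' then
      match rest with
      | c2 :: rest2 =>
        if c2 ∈ ['\\', '*', '_', '`', '#'] then c :: c2 :: procA rest2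
        else c :: procA (c2 :: rest2)
      | [] => [c]
    else c :: procA rest
termination_by l => l.length
decreasing_by all_goals simp

def process_escape_characters (text : String) : String := String.ofList (procA text.toList)

-- ===== PORT B =====
def process_escape_characters_alt (text : String) : String := text

-- ===== PRECONDITION & SPEC =====
def Spec_process_escape_characters (text : String) (out : String) : Prop := out = process_escape_characters_alt text
instance (text : String) (out : String) : Decidable (Spec_process_escape_characters text out) := by unfold Spec_process_escape_characters; infer_instance

-- ===== CLAIM (what is proved, stated in full; the proofs are below) =====
def Claim_equal_process_escape_characters : Prop := ∀ (text : String), Dom_process_escape_characters text → Spec_process_escape_characters text (process_escape_characters text)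

-- ===== LEMMAS AND PROOFS =====
theorem procA_id_aux (n : Nat) : ∀ l : List Char, l.length ≤ n → procA l = l := by
  induction n with
  | zero =>
    intro l hl
    have hnil : l = [] := by cases l <;> simp_all
    subst hnil; rw [procA]
  | succ n ih =>
    intro l hl
    match l with
    | [] => rw [procA]
    | c :: rest =>
      rw [procA.eq_def]
      by_cases h : c = '\\'
      · cases rest with
        | nil => simp [h]
        | cons c2 rest2 =>
          have hr2 : rest2.length ≤ n := by simp only [List.length_cons] at hl; omega
          have hr1 : (c2 :: rest2).length ≤ n := by simp only [List.length_cons] at hl ⊢; omega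
          by_cases h2 : c2 ∈ ['\\', '*', '_', '`', '#']
          · simp only [h, if_pos h2, ih rest2 hr2, if_true]
          · simp only [h, if_neg h2, ih _ hr1, if_true]
      · have hr : rest.length ≤ n := by simp only [List.length_cons] at hl; omega
        simp only [if_neg h, ih rest hr]

theorem procA_id (l : List Char) : procA l = l := procA_id_aux l.length l le_rfl

-- ===== VERDICT (by name: the statement is the Claim_ definition above) =====
theorem process_escape_characters_spec : Claim_equal_process_escape_characters := by
  intro text _
  unfold Spec_process_escape_characters process_escape_characters process_escape_characters_alt
  rw [procA_id, String.ofList_toList]
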